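-- pv_equiv track=rewrite | github.com/zxy3/tensorfuzz | test/dynamic_programming/LIS.py | get_max_indexs
-- ===== SOURCE A (Python) =====
-- def get_max_indexs(arr, dp_1, dp_2):
--     indexs = [0]
--     for i in range(len(arr)):
--         sum = dp_1[i] + dp_2[i]
--         if sum > dp_1[indexs[0]] + dp_2[indexs[0]]:
--             indexs = [i]
--         elif sum == dp_1[indexs[0]] + dp_2[indexs[0]]:
--             indexs.append(i)
--     indexs = list(set(indexs))
--     return indexs
-- ===== SOURCE B (Python) =====
-- def get_max_indexs(arr, dp_1, dp_2):
--     n = len(arr)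
--     best = max(dp_1[i] + dp_2[i] for i in range(n))
--     return list(set(i for i in range(n) if dp_1[i] + dp_2[i] == best))
-- ===== Notes on version B (the rewrite author's own statement) =====
-- stated objective: simpler
-- what changed: A's running-max-with-reset loop (restarting the candidate index list whenever a larger dp_1[i]+dp_2[i] appears, re-reading the dp arrays at indexs[0] each step) is replaced by a global-max-then-filter decomposition: one pass computes best = max(dp_1[i]+dp_2[i]), a second pass collects the indices attaining it, deduplicated with the same list(set(...)) finish.
-- outside the precondition, e.g. on get_max_indexs([], [], []): A returns [0], B raises ValueError
import Mathlib
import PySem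

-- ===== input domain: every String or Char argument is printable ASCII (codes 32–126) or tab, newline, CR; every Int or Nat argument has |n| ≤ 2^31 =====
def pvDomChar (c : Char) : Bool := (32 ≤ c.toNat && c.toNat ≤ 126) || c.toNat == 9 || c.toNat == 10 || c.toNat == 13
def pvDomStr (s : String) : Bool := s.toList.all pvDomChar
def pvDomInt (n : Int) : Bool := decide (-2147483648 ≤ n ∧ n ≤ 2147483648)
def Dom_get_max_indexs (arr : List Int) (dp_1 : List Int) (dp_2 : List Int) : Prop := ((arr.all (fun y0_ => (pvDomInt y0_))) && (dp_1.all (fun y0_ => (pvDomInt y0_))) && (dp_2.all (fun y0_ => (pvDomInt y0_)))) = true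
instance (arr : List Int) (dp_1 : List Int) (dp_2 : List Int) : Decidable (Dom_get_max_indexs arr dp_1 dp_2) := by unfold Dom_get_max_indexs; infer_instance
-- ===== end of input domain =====

-- B replaces A's running-max-with-reset index loop by a global-max-then-filter decomposition (same O(n) cost, plainer).


-- ===== PORT A =====
-- loop body of A: sum = dp_1[i] + dp_2[i]; compare with dp_1[indexs[0]] + dp_2[indexs[0]]
-- (pyGetD with default 0 is exact under Pre_, which keeps every index in range)
def pvStepA (dp_1 : List Int) (dp_2 : List Int) (indexs : List Int) (i : Int) : List Int :=
  let sum := PySem.List.pyGetD dp_1 i 0 + PySem.List.pyGetD dp_2 i 0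
  if sum > PySem.List.pyGetD dp_1 (PySem.List.pyGetD indexs 0 0) 0 + PySem.List.pyGetD dp_2 (PySem.List.pyGetD indexs 0 0) 0 then [i]
  else if sum = PySem.List.pyGetD dp_1 (PySem.List.pyGetD indexs 0 0) 0 + PySem.List.pyGetD dp_2 (PySem.List.pyGetD indexs 0 0) 0 then indexs ++ [i]
  else indexs

def get_max_indexs (arr : List Int) (dp_1 : List Int) (dp_2 : List Int) : List Int :=
  PySem.Set.ofList ((PySem.List.pyRange 0 (arr.length : Int) 1).foldl (pvStepA dp_1 dp_2) [0])

-- ===== PORT B =====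
def get_max_indexs_alt (arr : List Int) (dp_1 : List Int) (dp_2 : List Int) : List Int :=
  let n : Int := arr.length
  let best := (PySem.List.max? ((PySem.List.pyRange 0 n 1).map (fun i => PySem.List.pyGetD dp_1 i 0 + PySem.List.pyGetD dp_2 i 0)) (fun x => x)).getD 0
  PySem.Set.ofList ((PySem.List.pyRange 0 n 1).filter (fun i => PySem.List.pyGetD dp_1 i 0 + PySem.List.pyGetD dp_2 i 0 == best))

-- ===== PRECONDITION & SPEC =====
-- Pre_ excludes exactly the inputs where the Pythons raise: empty arr (A returns its sentinel [0]
-- but B's max(...) raises ValueError) and dp arrays shorter than arr (both raise IndexError).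
def Pre_get_max_indexs (arr : List Int) (dp_1 : List Int) (dp_2 : List Int) : Prop :=
  arr ≠ [] ∧ arr.length ≤ dp_1.length ∧ arr.length ≤ dp_2.length
instance (arr : List Int) (dp_1 : List Int) (dp_2 : List Int) : Decidable (Pre_get_max_indexs arr dp_1 dp_2) := by unfold Pre_get_max_indexs; infer_instance
def pvWitness_get_max_indexs : List Int × List Int × List Int := ([5, 7], [1, 2], [2, 1])

def Spec_get_max_indexs (arr : List Int) (dp_1 : List Int) (dp_2 : List Int) (out : List Int) : Prop := out = get_max_indexs_alt arr dp_1 dp_2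
instance (arr : List Int) (dp_1 : List Int) (dp_2 : List Int) (out : List Int) : Decidable (Spec_get_max_indexs arr dp_1 dp_2 out) := by unfold Spec_get_max_indexs; infer_instance

-- ===== CLAIM (what is proved, stated in full; the proofs are below) =====
def Claim_equal_get_max_indexs : Prop := ∀ (arr : List Int) (dp_1 : List Int) (dp_2 : List Int), Dom_get_max_indexs arr dp_1 dp_2 → Pre_get_max_indexs arr dp_1 dp_2 → Spec_get_max_indexs arr dp_1 dp_2 (get_max_indexs arr dp_1 dp_2)

-- ===== LEMMAS AND PROOFS =====

-- f i = dp_1[i] + dp_2[i]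
def pvF (dp_1 : List Int) (dp_2 : List Int) (i : Int) : Int :=
  PySem.List.pyGetD dp_1 i 0 + PySem.List.pyGetD dp_2 i 0

-- A's step, abstracted over f
def pvStep (f : Int → Int) (indexs : List Int) (i : Int) : List Int :=
  let sum := f i
  if sum > f (PySem.List.pyGetD indexs 0 0) then [i]
  else if sum = f (PySem.List.pyGetD indexs 0 0) then indexs ++ [i]
  else indexs

-- running maximum of f over 0..k-1 (k ≥ 1), in the shape PySem.List.max? produces
def pvBest (f : Int → Int) (k : Nat) : Int :=
  ((PySem.List.pyRange 1 (k : Int) 1).map f).foldl max (f 0)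

lemma pvStepA_eq (dp_1 dp_2 : List Int) : pvStepA dp_1 dp_2 = pvStep (pvF dp_1 dp_2) := rfl

lemma pvBest_succ (f : Int → Int) (k : Nat) (hk : 1 ≤ k) :
    pvBest f (k + 1) = max (pvBest f k) (f k) := by
  have hk' : (1 : Int) ≤ (k : Int) := by exact_mod_cast hk
  unfold pvBest
  push_cast
  rw [PySem.List.pyRange_one_succ_right hk']
  simp [List.foldl_append]

lemma pvInv (f : Int → Int) (k : Nat) (hk : 1 ≤ k) :
    ((PySem.List.pyRange 0 (k : Int) 1).foldl (pvStep f) [0]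
        = (if f 0 = pvBest f k then [(0 : Int)] else [])
            ++ (PySem.List.pyRange 0 (k : Int) 1).filter (fun i => f i == pvBest f k))
    ∧ (∀ i : Int, 0 ≤ i → i < (k : Int) → f i ≤ pvBest f k)
    ∧ (∃ j rest, (PySem.List.pyRange 0 (k : Int) 1).filter (fun i => f i == pvBest f k) = j :: rest ∧ f j = pvBest f k) := by
  induction k with
  | zero => exact absurd hk (by omega)
  | succ k ih =>
    rcases Nat.eq_zero_or_pos k with hk0 | hk1
    · -- base case k + 1 = 1
      subst hk0
      have hb : pvBest f 1 = f 0 := by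
        unfold pvBest
        norm_num [PySem.List.pyRange_one_eq_nil]
      have hr : PySem.List.pyRange 0 (1 : Int) 1 = [(0 : Int)] := by decide
      refine ⟨?_, ?_, 0, [], ?_, ?_⟩
      · simp [hr, hb, pvStep, PySem.List.pyGetD_zero_cons]
      · intro i h0 h1
        have : i = 0 := by omega
        simp [this, hb]
      · simp [hr, hb]
      · simp [hb]
    · -- inductive step, k ≥ 1
      obtain ⟨ihf, ihmax, j, rest, hfil, hfj⟩ := ih hk1
      have h0k : (0 : Int) ≤ (k : Int) := by positivity
      have h0ltk : (0 : Int) < (k : Int) := by exact_mod_cast hk1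
      have hcast : ((k + 1 : Nat) : Int) = (k : Int) + 1 := by push_cast; ring
      have hsplit : PySem.List.pyRange 0 ((k + 1 : Nat) : Int) 1
          = PySem.List.pyRange 0 (k : Int) 1 ++ [(k : Int)] := by
        rw [hcast]; exact PySem.List.pyRange_one_succ_right h0k
      have hbest : pvBest f (k + 1) = max (pvBest f k) (f k) := pvBest_succ f k hk1
      have hc : f (PySem.List.pyGetD ((if f 0 = pvBest f k then [(0 : Int)] else [])
          ++ (PySem.List.pyRange 0 (k : Int) 1).filter (fun i => f i == pvBest f k)) 0 0)
          = pvBest f k := by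
        rw [hfil]
        by_cases h0 : f 0 = pvBest f k
        · simp [h0, PySem.List.pyGetD_zero_cons]
        · simp [h0, PySem.List.pyGetD_zero_cons, hfj]
      rcases lt_trichotomy (f (k : Int)) (pvBest f k) with hlt | heq | hgt
      · -- f k < best : nothing changes
        have hbk : pvBest f (k + 1) = pvBest f k := by rw [hbest]; exact max_eq_left hlt.le
        refine ⟨?_, ?_, j, rest, ?_, ?_⟩
        · rw [hsplit, List.foldl_append, ihf, hbk, List.filter_append]
          simp only [List.foldl_cons, List.foldl_nil, pvStep]
          rw [hc]
          have h1 : ¬ f (k : Int) > pvBest f k := by omega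
          have h2 : ¬ f (k : Int) = pvBest f k := by omega
          simp [h1, h2]
        · intro i hi0 hi1
          rw [hbk]
          rcases lt_or_ge i (k : Int) with h | h
          · exact ihmax i hi0 h
          · have : i = (k : Int) := by omega
            simp [this, hlt.le]
        · rw [hsplit, List.filter_append, hbk, hfil]
          have h2 : ¬ f (k : Int) = pvBest f k := by omega
          simp [h2]
        · rw [hbk]; exact hfj
      · -- f k = best : k is appended
        have hbk : pvBest f (k + 1) = pvBest f k := by rw [hbest]; exact max_eq_left heq.le
        refine ⟨?_, ?_, j, rest ++ [(k : Int)], ?_, ?_⟩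
        · rw [hsplit, List.foldl_append, ihf, hbk, List.filter_append]
          simp only [List.foldl_cons, List.foldl_nil, pvStep]
          rw [hc]
          simp [heq]
        · intro i hi0 hi1
          rw [hbk]
          rcases lt_or_ge i (k : Int) with h | h
          · exact ihmax i hi0 h
          · have : i = (k : Int) := by omega
            simp [this, heq.le]
        · rw [hsplit, List.filter_append, hbk, hfil]
          simp [heq]
        · rw [hbk]; exact hfj
      · -- f k > best : reset to [k]
        have hbk : pvBest f (k + 1) = f (k : Int) := by rw [hbest]; exact max_eq_right hgt.le
        have hnone : ∀ i ∈ PySem.List.pyRange 0 (k : Int) 1, ¬ (f i == f (k : Int)) = true := by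
          intro i hi
          rw [PySem.List.mem_pyRange_one] at hi
          have := ihmax i hi.1 hi.2
          simp only [beq_iff_eq]
          omega
        have hf0 : ¬ f 0 = f (k : Int) := by
          have := ihmax 0 le_rfl h0ltk
          omega
        refine ⟨?_, ?_, (k : Int), [], ?_, ?_⟩
        · rw [hsplit, List.foldl_append, ihf, hbk, List.filter_append]
          simp only [List.foldl_cons, List.foldl_nil, pvStep]
          rw [hc]
          rw [List.filter_eq_nil_iff.mpr hnone]
          simp [hgt, hf0]
        · intro i hi0 hi1
          rw [hbk]
          rcases lt_or_ge i (k : Int) with h | h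
          · exact le_trans (ihmax i hi0 h) hgt.le
          · have : i = (k : Int) := by omega
            simp [this]
        · rw [hsplit, List.filter_append, hbk, List.filter_eq_nil_iff.mpr hnone]
          simp
        · rw [hbk]

lemma pvOfList_dup (x : Int) (l : List Int) :
    PySem.Set.ofList (x :: x :: l) = PySem.Set.ofList (x :: l) := by
  rw [PySem.Set.ofList_eq_foldl, PySem.Set.ofList_eq_foldl]
  simp only [List.foldl_cons]
  have h0 : PySem.Set.add ([] : List Int) x = [x] := by
    rw [PySem.Set.add_of_not_mem (by simp)]; simp
  rw [h0, PySem.Set.add_of_mem (by simp)]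

-- ===== VERDICT (by name: the statement is the Claim_ definition above) =====
theorem get_max_indexs_spec : Claim_equal_get_max_indexs := by
  intro arr dp_1 dp_2 _hdom hpre
  obtain ⟨hne, -, -⟩ := hpre
  unfold Spec_get_max_indexs
  have hk1 : 1 ≤ arr.length := List.length_pos_iff.mpr hne
  obtain ⟨hfold, hmax, j, rest, hfil, hfj⟩ := pvInv (pvF dp_1 dp_2) arr.length hk1
  have hn : (0 : Int) < (arr.length : Int) := by exact_mod_cast hk1
  have hcons : PySem.List.pyRange 0 (arr.length : Int) 1
      = 0 :: PySem.List.pyRange 1 (arr.length : Int) 1 := PySem.List.pyRange_one_cons hn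
  have hA : get_max_indexs arr dp_1 dp_2
      = PySem.Set.ofList ((if pvF dp_1 dp_2 0 = pvBest (pvF dp_1 dp_2) arr.length then [(0 : Int)] else [])
          ++ (PySem.List.pyRange 0 (arr.length : Int) 1).filter
              (fun i => pvF dp_1 dp_2 i == pvBest (pvF dp_1 dp_2) arr.length)) := by
    unfold get_max_indexs
    rw [pvStepA_eq, hfold]
  have hB : get_max_indexs_alt arr dp_1 dp_2
      = PySem.Set.ofList ((PySem.List.pyRange 0 (arr.length : Int) 1).filter
          (fun i => pvF dp_1 dp_2 i
            == (PySem.List.max? ((PySem.List.pyRange 0 (arr.length : Int) 1).map (pvF dp_1 dp_2)) (fun x => x)).getD 0)) := rfl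
  have hbmax : (PySem.List.max? ((PySem.List.pyRange 0 (arr.length : Int) 1).map (pvF dp_1 dp_2)) (fun x => x)).getD 0
      = pvBest (pvF dp_1 dp_2) arr.length := by
    rw [hcons, List.map_cons, PySem.List.max?_id_cons]
    rfl
  rw [hA, hB]
  simp only [hbmax]
  by_cases h0 : pvF dp_1 dp_2 0 = pvBest (pvF dp_1 dp_2) arr.length
  · have hfc : (PySem.List.pyRange 0 (arr.length : Int) 1).filter
        (fun i => pvF dp_1 dp_2 i == pvBest (pvF dp_1 dp_2) arr.length)
        = 0 :: (PySem.List.pyRange 1 (arr.length : Int) 1).filter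
            (fun i => pvF dp_1 dp_2 i == pvBest (pvF dp_1 dp_2) arr.length) := by
      rw [hcons]
      simp [h0]
    rw [if_pos h0, hfc, List.singleton_append]
    exact pvOfList_dup 0 _
  · rw [if_neg h0, List.nil_append]
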